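-- pv_equiv track=rewrite | github.com/carol-747/signalmesh-local-agent | src/agent.py | _generate_suggested_actions
-- ===== SOURCE A (Python) =====
-- from typing import Any, Dict, List, Optional
--
-- def _generate_suggested_actions(parsed_files: List[Dict[str, Any]]) -> List[Dict[str, str]]:
--     """Generate suggested follow-up actions."""
--     actions = [
--         {
--             "action": "semantic_search",
--             "description": "Search for specific topics in the workspace",
--             "example": "Find all code related to 'data processing'"
--         }
--     ]
--
--     # Add specific suggestions based on content
--     has_code = any(f.get("file_type") == "code" for f in parsed_files)
--     has_notebook = any(f.get("file_type") == "notebook" for f in parsed_files)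
--
--     if has_code:
--         actions.append({
--             "action": "deep_dive",
--             "description": "Get detailed analysis of specific code file",
--             "example": "Analyze [filename].py in detail"
--         })
--
--     if has_notebook:
--         actions.append({
--             "action": "execute_notebook",
--             "description": "Run notebook to see results",
--             "example": "Execute notebook and show outputs"
--         })
--
--     actions.append({
--         "action": "compare",
--         "description": "Compare with previous time period",
--         "example": "Show changes from last week"
--     })
--
--     return actions
-- ===== SOURCE B (Python) =====
-- from typing import Any, Dict, List, Optional
--
-- # Declarative table: (trigger file_type or None for unconditional, action).
-- _ACTION_TABLE = [
--     (None, {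
--         "action": "semantic_search",
--         "description": "Search for specific topics in the workspace",
--         "example": "Find all code related to 'data processing'"
--     }),
--     ("code", {
--         "action": "deep_dive",
--         "description": "Get detailed analysis of specific code file",
--         "example": "Analyze [filename].py in detail"
--     }),
--     ("notebook", {
--         "action": "execute_notebook",
--         "description": "Run notebook to see results",
--         "example": "Execute notebook and show outputs"
--     }),
--     (None, {
--         "action": "compare",
--         "description": "Compare with previous time period",
--         "example": "Show changes from last week"
--     }),
-- ]
--
--
-- def _generate_suggested_actions(parsed_files: List[Dict[str, Any]]) -> List[Dict[str, str]]:
--     """Table-driven: one early-exiting scan collects the trigger types present,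
--     then the action list is filtered from the table."""
--     needed = {t for t, _ in _ACTION_TABLE if t is not None}
--     found = set()
--     for f in parsed_files:
--         t = f.get("file_type")
--         if t in needed:
--             found.add(t)
--             if needed <= found:
--                 break
--     return [dict(action) for t, action in _ACTION_TABLE if t is None or t in found]
-- ===== Notes on version B (the rewrite author's own statement) =====
-- stated objective: alternative
-- what changed: B is table-driven: a declarative (trigger, action) table replaces the hard-coded append sequence; one early-exiting scan over parsed_files collects the trigger types present into a set and stops as soon as all are found, and the result is produced by filtering the table on that set instead of two separate any() scans with conditional appends.
import Mathlib
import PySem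

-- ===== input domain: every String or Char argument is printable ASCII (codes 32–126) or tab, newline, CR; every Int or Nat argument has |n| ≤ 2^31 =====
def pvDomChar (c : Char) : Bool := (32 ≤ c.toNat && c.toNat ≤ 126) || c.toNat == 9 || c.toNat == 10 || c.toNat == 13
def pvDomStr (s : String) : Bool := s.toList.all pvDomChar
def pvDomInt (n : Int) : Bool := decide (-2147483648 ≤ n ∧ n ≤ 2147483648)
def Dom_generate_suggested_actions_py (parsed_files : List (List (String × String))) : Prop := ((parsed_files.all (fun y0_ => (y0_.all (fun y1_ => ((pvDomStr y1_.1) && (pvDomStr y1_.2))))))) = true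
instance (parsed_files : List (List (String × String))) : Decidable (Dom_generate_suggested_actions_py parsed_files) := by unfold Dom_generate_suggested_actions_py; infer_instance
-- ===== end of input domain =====

-- B is table-driven: a (trigger, action) table, one early-exiting scan collecting the
-- trigger types present, then a filter of the table — instead of A's two any() scans
-- with conditional appends. Same O(n) cost; objective: alternative structure.

-- the fixed action dicts (shared literals, not logic)
def pvActSearch : List (String × String) :=
  [("action", "semantic_search"),
   ("description", "Search for specific topics in the workspace"),
   ("example", "Find all code related to 'data processing'")]
def pvActDeepDive : List (String × String) :=
  [("action", "deep_dive"),
   ("description", "Get detailed analysis of specific code file"),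
   ("example", "Analyze [filename].py in detail")]
def pvActNotebook : List (String × String) :=
  [("action", "execute_notebook"),
   ("description", "Run notebook to see results"),
   ("example", "Execute notebook and show outputs")]
def pvActCompare : List (String × String) :=
  [("action", "compare"),
   ("description", "Compare with previous time period"),
   ("example", "Show changes from last week")]

-- ===== PORT A =====
def generate_suggested_actions_py (parsed_files : List (List (String × String))) : List (List (String × String)) :=
  let actions := [pvActSearch]
  let has_code := parsed_files.any (fun f => (PySem.Dict.mk f).get? "file_type" == some "code")
  let has_notebook := parsed_files.any (fun f => (PySem.Dict.mk f).get? "file_type" == some "notebook")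
  let actions := if has_code then actions ++ [pvActDeepDive] else actions
  let actions := if has_notebook then actions ++ [pvActNotebook] else actions
  actions ++ [pvActCompare]

-- ===== PORT B (Source B, step for step) =====
-- the declarative table _ACTION_TABLE
def pvTable : List (Option String × List (String × String)) :=
  [(none, pvActSearch), (some "code", pvActDeepDive),
   (some "notebook", pvActNotebook), (none, pvActCompare)]

-- the for-loop over parsed_files with its early `break` once needed <= found
def pvScan (needed : PySem.Set String) :
    List (List (String × String)) → PySem.Set String → PySem.Set String
  | [], found => found
  | f :: rest, found =>
    match (PySem.Dict.mk f).get? "file_type" with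
    | some t =>
      if PySem.Set.contains needed t then
        let found' := PySem.Set.add found t
        if PySem.Set.issubset needed found' then found'   -- break
        else pvScan needed rest found'
      else pvScan needed rest found
    | none => pvScan needed rest found                    -- None is never in needed

def generate_suggested_actions_py_alt (parsed_files : List (List (String × String))) : List (List (String × String)) :=
  let needed : PySem.Set String := PySem.Set.ofList (pvTable.filterMap Prod.fst)
  let found := pvScan needed parsed_files PySem.Set.empty
  pvTable.filterMap (fun p =>
    match p.1 with
    | none => some p.2
    | some t => if PySem.Set.contains found t then some p.2 else none)

-- ===== PRECONDITION & SPEC =====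
def Spec_generate_suggested_actions_py (parsed_files : List (List (String × String))) (out : List (List (String × String))) : Prop := out = generate_suggested_actions_py_alt parsed_files
instance (parsed_files : List (List (String × String))) (out : List (List (String × String))) : Decidable (Spec_generate_suggested_actions_py parsed_files out) := by unfold Spec_generate_suggested_actions_py; infer_instance

-- ===== CLAIM (what is proved, stated in full; the proofs are below) =====
def Claim_equal_generate_suggested_actions_py : Prop := ∀ (parsed_files : List (List (String × String))), Dom_generate_suggested_actions_py parsed_files → Spec_generate_suggested_actions_py parsed_files (generate_suggested_actions_py parsed_files)

-- ===== LEMMAS AND PROOFS =====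

-- membership in the scan result = "already in found" or "some file has this type"
-- (v ∈ needed covers the early break: needed ⊆ found' forces v ∈ found')
theorem pv_scan_contains (needed : PySem.Set String) (v : String) (hv : v ∈ needed)
    (files : List (List (String × String))) (found : PySem.Set String) :
    PySem.Set.contains (pvScan needed files found) v
      = (PySem.Set.contains found v
         || files.any (fun f => (PySem.Dict.mk f).get? "file_type" == some v)) := by
  induction files generalizing found with
  | nil => simp [pvScan]
  | cons f rest ih =>
    simp only [pvScan, List.any_cons]
    cases h : (PySem.Dict.mk f).get? "file_type" with
    | none => simp only [ih]; simp
    | some t =>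
      have hpred : ((some t : Option String) == some v) = (t == v) := by
        cases hx : (t == v) <;> simp_all
      have hadd : PySem.Set.contains (PySem.Set.add found t) v
          = (PySem.Set.contains found v || (t == v)) := by
        have hm := PySem.Set.mem_add found t v
        cases hfv : PySem.Set.contains found v <;> cases hx : (t == v) <;>
          simp_all [beq_iff_eq, Eq.comm (a := v) (b := t)]
      by_cases hn : PySem.Set.contains needed t = true
      · by_cases hb : PySem.Set.issubset needed (PySem.Set.add found t) = true
        · -- break: needed ⊆ found', and v ∈ needed, so both sides are true
          have h1 : (PySem.Set.contains found v || (t == v)) = true := by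
            rw [← hadd]
            exact (PySem.Set.contains_iff _ _).mpr
              ((PySem.Set.issubset_iff needed _).mp hb v hv)
          simp only [hn, hb, if_pos, hadd, hpred, h1]
          rcases Bool.or_eq_true_iff.mp h1 with h2 | h2 <;> rw [h2] <;> simp
        · rw [Bool.not_eq_true] at hb
          simp only [hn, hb, Bool.false_eq_true, if_pos, if_false, ih, hadd,
            hpred, Bool.or_assoc]
      · rw [Bool.not_eq_true] at hn
        have hx : (t == v) = false := by
          cases hx : (t == v)
          · rfl
          · rw [beq_iff_eq.mp hx] at hn
            rw [(PySem.Set.contains_iff needed v).mpr hv] at hn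
            exact absurd hn (by simp)
        simp only [hn, Bool.false_eq_true, if_false, ih, hpred, hx]
        simp

-- ===== VERDICT (by name: the statement is the Claim_ definition above) =====
theorem generate_suggested_actions_py_spec : Claim_equal_generate_suggested_actions_py := by
  intro parsed_files _
  unfold Spec_generate_suggested_actions_py generate_suggested_actions_py generate_suggested_actions_py_alt
  have hc := pv_scan_contains (PySem.Set.ofList (pvTable.filterMap Prod.fst)) "code"
    (by decide) parsed_files PySem.Set.empty
  have hn := pv_scan_contains (PySem.Set.ofList (pvTable.filterMap Prod.fst)) "notebook"
    (by decide) parsed_files PySem.Set.empty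
  rw [show PySem.Set.contains PySem.Set.empty "code" = false from rfl, Bool.false_or] at hc
  rw [show PySem.Set.contains PySem.Set.empty "notebook" = false from rfl, Bool.false_or] at hn
  have hc' : ("code" ∈ pvScan (PySem.Set.ofList ["code", "notebook"]) parsed_files [])
      ↔ (parsed_files.any (fun f => (PySem.Dict.mk f).get? "file_type" == some "code") = true) := by
    rw [← PySem.Set.contains_iff]
    show (pvScan (PySem.Set.ofList (pvTable.filterMap Prod.fst)) parsed_files
      PySem.Set.empty).contains "code" = true ↔ _
    rw [hc]
  have hn' : ("notebook" ∈ pvScan (PySem.Set.ofList ["code", "notebook"]) parsed_files [])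
      ↔ (parsed_files.any (fun f => (PySem.Dict.mk f).get? "file_type" == some "notebook") = true) := by
    rw [← PySem.Set.contains_iff]
    show (pvScan (PySem.Set.ofList (pvTable.filterMap Prod.fst)) parsed_files
      PySem.Set.empty).contains "notebook" = true ↔ _
    rw [hn]
  cases h1 : parsed_files.any (fun f => (PySem.Dict.mk f).get? "file_type" == some "code") <;>
  cases h2 : parsed_files.any (fun f => (PySem.Dict.mk f).get? "file_type" == some "notebook") <;>
    simp [pvTable, h1, h2, hc', hn']
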